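-- pv_equiv track=rewrite | github.com/EoinDavey/Competitive | AIPO/2018-Prelims/p4.py | cnt4
-- ===== SOURCE A (Python) =====
-- def cnt4(n):
--     c = 0
--     s = 0
--     while(1):
--         s = s*5 + 4
--         if s > n:
--             break
--         c+=1
--     return c
-- ===== SOURCE B (Python) =====
-- def cnt4(n):
--     m = n + 1
--     c = 0
--     while m >= 5:
--         m //= 5
--         c += 1
--     return c
-- ===== Notes on version B (the rewrite author's own statement) =====
-- stated objective: simpler
-- what changed: Instead of growing the repunit s = 5*s+4 upward until it exceeds n, B counts how many times n+1 can be floor-divided by 5 before dropping below 5 (the largest k with 5^k <= n+1).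
import Mathlib
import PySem

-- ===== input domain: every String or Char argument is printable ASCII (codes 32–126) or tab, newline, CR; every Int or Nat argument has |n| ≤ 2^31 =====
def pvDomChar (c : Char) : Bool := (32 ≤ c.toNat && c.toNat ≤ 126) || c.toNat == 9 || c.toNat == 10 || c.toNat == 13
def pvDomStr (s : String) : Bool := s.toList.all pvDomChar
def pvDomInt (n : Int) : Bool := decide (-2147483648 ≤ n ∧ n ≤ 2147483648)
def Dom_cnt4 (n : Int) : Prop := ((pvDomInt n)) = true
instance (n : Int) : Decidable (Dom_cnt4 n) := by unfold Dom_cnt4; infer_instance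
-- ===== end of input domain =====

-- B replaces A's upward loop (grow s = 5*s+4 until it exceeds n) by counting how many
-- times n+1 can be floor-divided by 5 before dropping below 5; objective: simpler.

-- ===== PORT A =====
-- A's 'while(1)' loop; the invariant 0 ≤ s is carried as a proof argument only for termination
def cnt4Loop (n c s : Int) (hs : 0 ≤ s) : Int :=
  if s * 5 + 4 > n then c else cnt4Loop n (c + 1) (s * 5 + 4) (by omega)
termination_by (n + 1 - s).toNat
decreasing_by omega

def cnt4 (n : Int) : Int := cnt4Loop n 0 0 (by omega)

-- ===== PORT B =====
def cnt4AltLoop (m c : Int) : Int :=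
  if 5 ≤ m then cnt4AltLoop (PySem.Int.floordiv m 5) (c + 1) else c
termination_by m.toNat
decreasing_by
  rw [PySem.Int.floordiv_eq_ediv_of_pos (by norm_num)]; omega

def cnt4_alt (n : Int) : Int := cnt4AltLoop (n + 1) 0

-- ===== PRECONDITION & SPEC =====
def Spec_cnt4 (n : Int) (out : Int) : Prop := out = cnt4_alt n
instance (n : Int) (out : Int) : Decidable (Spec_cnt4 n out) := by unfold Spec_cnt4; infer_instance

-- ===== CLAIM (what is proved, stated in full; the proofs are below) =====
def Claim_equal_cnt4 : Prop := ∀ (n : Int), Dom_cnt4 n → Spec_cnt4 n (cnt4 n)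

-- ===== LEMMAS AND PROOFS =====

-- one-step unfolding equations
theorem cnt4Loop_step (n c s : Int) (hs : 0 ≤ s) :
    cnt4Loop n c s hs =
      if s * 5 + 4 > n then c else cnt4Loop n (c + 1) (s * 5 + 4) (by omega) := by
  rw [cnt4Loop]

theorem cnt4AltLoop_step (m c : Int) :
    cnt4AltLoop m c =
      if 5 ≤ m then cnt4AltLoop (PySem.Int.floordiv m 5) (c + 1) else c := by
  rw [cnt4AltLoop]

-- equal states give equal results (independent of the carried positivity proof)
theorem cnt4Loop_congr_state (n c s s' : Int) (hs : 0 ≤ s) (hs' : 0 ≤ s')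
    (h : s = s') : cnt4Loop n c s hs = cnt4Loop n c s' hs' := by subst h; rfl

-- the accumulator of A's loop only shifts the result
theorem cnt4Loop_shift : ∀ (k : Nat) (n c c' s : Int) (hs : 0 ≤ s),
    (n + 1 - s).toNat ≤ k → cnt4Loop n c s hs - c = cnt4Loop n c' s hs - c' := by
  intro k
  induction k with
  | zero =>
    intro n c c' s hs hk
    have h : s * 5 + 4 > n := by omega
    rw [cnt4Loop_step n c s hs, cnt4Loop_step n c' s hs, if_pos h, if_pos h]
    omega
  | succ k ih =>
    intro n c c' s hs hk
    rw [cnt4Loop_step n c s hs, cnt4Loop_step n c' s hs]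
    by_cases h : s * 5 + 4 > n
    · rw [if_pos h, if_pos h]; omega
    · rw [if_neg h, if_neg h]
      have h1 := ih n (c + 1) (c' + 1) (s * 5 + 4) (by omega) (by omega)
      omega

-- the accumulator of B's loop only shifts the result
theorem cnt4AltLoop_shift : ∀ (k : Nat) (m c c' : Int),
    m.toNat ≤ k → cnt4AltLoop m c - c = cnt4AltLoop m c' - c' := by
  intro k
  induction k with
  | zero =>
    intro m c c' hk
    have h : ¬ (5 ≤ m) := by omega
    rw [cnt4AltLoop_step m c, cnt4AltLoop_step m c', if_neg h, if_neg h]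
    omega
  | succ k ih =>
    intro m c c' hk
    rw [cnt4AltLoop_step m c, cnt4AltLoop_step m c']
    by_cases h : 5 ≤ m
    · rw [if_pos h, if_pos h]
      have hfd : PySem.Int.floordiv m 5 = m / 5 :=
        PySem.Int.floordiv_eq_ediv_of_pos (by norm_num)
      have h1 := ih (PySem.Int.floordiv m 5) (c + 1) (c' + 1) (by rw [hfd]; omega)
      omega
    · rw [if_neg h, if_neg h]; omega

-- A's loop on states of the form 5*t+4 is A's loop on the scaled-down bound (n-4)//5
theorem cnt4Loop_scale : ∀ (k : Nat) (n c t : Int) (ht : 0 ≤ t),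
    (n + 1 - (5 * t + 4)).toNat ≤ k →
    cnt4Loop n c (5 * t + 4) (by omega) =
      cnt4Loop (PySem.Int.floordiv (n - 4) 5) c t ht := by
  intro k
  induction k with
  | zero =>
    intro n c t ht hk
    have hfd : PySem.Int.floordiv (n - 4) 5 = (n - 4) / 5 :=
      PySem.Int.floordiv_eq_ediv_of_pos (by norm_num)
    have h1 : (5 * t + 4) * 5 + 4 > n := by omega
    have h2 : t * 5 + 4 > PySem.Int.floordiv (n - 4) 5 := by rw [hfd]; omega
    rw [cnt4Loop_step n c (5 * t + 4), cnt4Loop_step (PySem.Int.floordiv (n - 4) 5) c t ht,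
        if_pos h1, if_pos h2]
  | succ k ih =>
    intro n c t ht hk
    have hfd : PySem.Int.floordiv (n - 4) 5 = (n - 4) / 5 :=
      PySem.Int.floordiv_eq_ediv_of_pos (by norm_num)
    have hcond : ((5 * t + 4) * 5 + 4 > n) ↔ (t * 5 + 4 > PySem.Int.floordiv (n - 4) 5) := by
      rw [hfd]; omega
    rw [cnt4Loop_step n c (5 * t + 4), cnt4Loop_step (PySem.Int.floordiv (n - 4) 5) c t ht]
    by_cases h : (5 * t + 4) * 5 + 4 > n
    · rw [if_pos h, if_pos (hcond.mp h)]
    · rw [if_neg h, if_neg (fun hx => h (hcond.mpr hx))]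
      rw [cnt4Loop_congr_state n (c + 1) ((5 * t + 4) * 5 + 4) (5 * (t * 5 + 4) + 4)
            (by omega) (by omega) (by ring)]
      exact ih n (c + 1) (t * 5 + 4) (by omega) (by omega)

-- main equality, by strong induction on n
theorem cnt4_eq_alt : ∀ (k : Nat) (n : Int), n.toNat ≤ k → cnt4 n = cnt4_alt n := by
  intro k
  induction k with
  | zero =>
    intro n hk
    have h1 : (0 : Int) * 5 + 4 > n := by omega
    have h2 : ¬ (5 ≤ n + 1) := by omega
    unfold cnt4 cnt4_alt
    rw [cnt4Loop_step n 0 0, cnt4AltLoop_step (n + 1) 0, if_pos h1, if_neg h2]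
  | succ k ih =>
    intro n hk
    unfold cnt4 cnt4_alt
    rw [cnt4Loop_step n 0 0, cnt4AltLoop_step (n + 1) 0]
    by_cases h : (0 : Int) * 5 + 4 > n
    · rw [if_pos h, if_neg (show ¬ (5 ≤ n + 1) by omega)]
    · rw [if_neg h, if_pos (show 5 ≤ n + 1 by omega)]
      have hfd : PySem.Int.floordiv (n - 4) 5 = (n - 4) / 5 :=
        PySem.Int.floordiv_eq_ediv_of_pos (by norm_num)
      have hfd1 : PySem.Int.floordiv (n + 1) 5 = (n + 1) / 5 :=
        PySem.Int.floordiv_eq_ediv_of_pos (by norm_num)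
      have hn' : 0 ≤ PySem.Int.floordiv (n - 4) 5 := by rw [hfd]; omega
      -- A side: cnt4Loop n 1 4 = cnt4Loop n' 1 0 = 1 + cnt4 n'
      have hA : cnt4Loop n (0 + 1) (0 * 5 + 4) (by omega) =
          1 + cnt4 (PySem.Int.floordiv (n - 4) 5) := by
        rw [cnt4Loop_congr_state n (0 + 1) (0 * 5 + 4) (5 * 0 + 4)
              (by omega) (by omega) (by ring)]
        rw [cnt4Loop_scale ((n + 1 - (5 * 0 + 4)).toNat) n (0 + 1) 0 (by omega) (by omega)]
        unfold cnt4
        have := cnt4Loop_shift ((PySem.Int.floordiv (n - 4) 5 + 1).toNat)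
          (PySem.Int.floordiv (n - 4) 5) (0 + 1) 0 0 (by omega) (by omega)
        omega
      -- B side: cnt4AltLoop ((n+1)//5) 1 = 1 + cnt4_alt n'
      have hB : cnt4AltLoop (PySem.Int.floordiv (n + 1) 5) (0 + 1) =
          1 + cnt4_alt (PySem.Int.floordiv (n - 4) 5) := by
        unfold cnt4_alt
        have harg : PySem.Int.floordiv (n + 1) 5 = PySem.Int.floordiv (n - 4) 5 + 1 := by
          rw [hfd, hfd1]; omega
        rw [harg]
        have := cnt4AltLoop_shift ((PySem.Int.floordiv (n - 4) 5 + 1).toNat)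
          (PySem.Int.floordiv (n - 4) 5 + 1) (0 + 1) 0 (le_refl _)
        omega
      rw [hA, hB, ih (PySem.Int.floordiv (n - 4) 5) (by rw [hfd]; omega)]

-- ===== VERDICT (by name: the statement is the Claim_ definition above) =====
theorem cnt4_spec : Claim_equal_cnt4 := by
  intro n _
  unfold Spec_cnt4
  exact cnt4_eq_alt n.toNat n (le_refl _)
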